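-- pv_equiv track=rewrite | github.com/cjreams2005/labs | Lab09/recursion.py | array_to_sting
-- ===== SOURCE A (Python) =====
-- def array_to_sting(a, index = 0):
--     if index == len(a):
--         return ""
--     number = str(a[index])
--     if index == len(a)-1:
--         return number
--     else:
--         return number + "," + array_to_sting(a, index + 1)
-- ===== SOURCE B (Python) =====
-- def array_to_sting(a, index=0):
--     parts = []
--     i = index
--     while i != len(a):
--         parts.append(str(a[i]))
--         i += 1
--     return ",".join(parts)
-- ===== Notes on version B (the rewrite author's own statement) =====
-- stated objective: faster
-- what changed: Replaces the head recursion (building the string with nested '+' concatenations and an index==len-1 separator case) by a forward while-loop that collects str(a[i]) into a list and returns ','.join(parts), letting join handle the separators.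
import Mathlib
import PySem

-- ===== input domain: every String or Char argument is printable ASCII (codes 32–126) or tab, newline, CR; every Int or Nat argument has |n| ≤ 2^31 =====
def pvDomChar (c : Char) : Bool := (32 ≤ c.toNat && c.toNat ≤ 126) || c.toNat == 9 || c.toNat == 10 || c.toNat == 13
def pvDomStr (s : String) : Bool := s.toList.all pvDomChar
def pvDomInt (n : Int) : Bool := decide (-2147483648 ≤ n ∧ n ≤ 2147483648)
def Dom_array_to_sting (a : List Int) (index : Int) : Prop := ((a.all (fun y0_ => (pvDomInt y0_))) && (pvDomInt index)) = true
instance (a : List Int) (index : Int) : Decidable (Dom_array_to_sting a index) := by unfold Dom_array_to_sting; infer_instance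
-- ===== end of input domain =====

-- B replaces A's head recursion with a forward loop collecting the digits and one ",".join (idiomatic).

-- ===== PORT A =====
def array_to_sting (a : List Int) (index : Int) : String :=
  if index = (a.length : Int) then ""
  else
    match _h : PySem.List.pyGet? a index with
    | none => ""   -- IndexError: excluded by Pre_array_to_sting
    | some x =>
      let number := PySem.Int.toStr x
      if index = (a.length : Int) - 1 then number
      else number ++ "," ++ array_to_sting a (index + 1)
termination_by ((a.length : Int) + 1 - index).toNat
decreasing_by
  have hm : ¬ (PySem.List.pyGet? a index = none) := by simp [_h]
  rw [PySem.List.pyGet?_eq_none_iff] at hm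
  have := not_not.mp hm
  unfold PySem.Raise.InRange at this
  omega

-- ===== PORT B =====
-- the while-loop of Source B: parts accumulates str(a[i]) while i != len(a)
def arrayPartsLoop (a : List Int) (i : Int) (parts : List String) : List String :=
  if i = (a.length : Int) then parts
  else
    match _h : PySem.List.pyGet? a i with
    | none => parts   -- IndexError: excluded by Pre_array_to_sting
    | some x => arrayPartsLoop a (i + 1) (parts ++ [PySem.Int.toStr x])
termination_by ((a.length : Int) + 1 - i).toNat
decreasing_by
  have hm : ¬ (PySem.List.pyGet? a i = none) := by simp [_h]
  rw [PySem.List.pyGet?_eq_none_iff] at hm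
  have := not_not.mp hm
  unfold PySem.Raise.InRange at this
  omega

def array_to_sting_alt (a : List Int) (index : Int) : String :=
  PySem.Str.join "," (arrayPartsLoop a index [])

-- ===== PRECONDITION & SPEC =====
-- Pre_ excludes exactly the inputs on which Python A raises IndexError (index out of range and ≠ len(a)).
def Pre_array_to_sting (a : List Int) (index : Int) : Prop :=
  -(a.length : Int) ≤ index ∧ index ≤ (a.length : Int)
instance (a : List Int) (index : Int) : Decidable (Pre_array_to_sting a index) := by
  unfold Pre_array_to_sting; infer_instance
def pvWitness_array_to_sting : List Int × Int := ([1, -2, 3], 0)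

def Spec_array_to_sting (a : List Int) (index : Int) (out : String) : Prop := out = array_to_sting_alt a index
instance (a : List Int) (index : Int) (out : String) : Decidable (Spec_array_to_sting a index out) := by unfold Spec_array_to_sting; infer_instance

-- ===== CLAIM (what is proved, stated in full; the proofs are below) =====
def Claim_equal_array_to_sting : Prop := ∀ (a : List Int) (index : Int), Dom_array_to_sting a index → Pre_array_to_sting a index → Spec_array_to_sting a index (array_to_sting a index)

-- ===== LEMMAS AND PROOFS =====

lemma pyJoin_nil : PySem.Str.join "," ([] : List String) = "" := rfl

lemma pyJoin_singleton (s : String) : PySem.Str.join "," [s] = s := by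
  simp [PySem.Str.join, PySem.Chars.join_singleton]

lemma pyJoin_cons_cons (s t : String) (l : List String) :
    PySem.Str.join "," (s :: t :: l) = s ++ "," ++ PySem.Str.join "," (t :: l) := by
  apply String.toList_inj.mp
  simp [PySem.Str.join, PySem.Chars.join_cons_cons, String.toList_append]

lemma inRange_of_pyGet?_some {a : List Int} {i : Int} {x : Int}
    (h : PySem.List.pyGet? a i = some x) : -(a.length : Int) ≤ i ∧ i < (a.length : Int) := by
  have hm : ¬ (PySem.List.pyGet? a i = none) := by simp [h]
  rw [PySem.List.pyGet?_eq_none_iff] at hm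
  have := not_not.mp hm
  unfold PySem.Raise.InRange at this
  omega

-- the loop's accumulator only prepends: run it from [] and append
lemma arrayPartsLoop_acc_aux (a : List Int) : ∀ (n : Nat) (i : Int) (parts : List String),
    (((a.length : Int) + 1 - i).toNat ≤ n) →
    arrayPartsLoop a i parts = parts ++ arrayPartsLoop a i [] := by
  intro n
  induction n with
  | zero =>
    intro i parts h
    rw [arrayPartsLoop, arrayPartsLoop]
    split
    · simp
    · rcases hg : PySem.List.pyGet? a i with _ | x
      · simp
      · exact absurd ((inRange_of_pyGet?_some hg).2) (by omega)
  | succ n ih =>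
    intro i parts h
    rw [arrayPartsLoop, arrayPartsLoop]
    split
    · simp
    · rcases hg : PySem.List.pyGet? a i with _ | x
      · simp
      · simp only []
        have hlt := (inRange_of_pyGet?_some hg).2
        rw [ih (i + 1) (parts ++ [PySem.Int.toStr x]) (by omega),
            ih (i + 1) ([] ++ [PySem.Int.toStr x]) (by omega)]
        simp

lemma arrayPartsLoop_acc (a : List Int) (i : Int) (parts : List String) :
    arrayPartsLoop a i parts = parts ++ arrayPartsLoop a i [] :=
  arrayPartsLoop_acc_aux a (((a.length : Int) + 1 - i).toNat) i parts le_rfl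

lemma arrayPartsLoop_cons {a : List Int} {i : Int} {x : Int}
    (hg : PySem.List.pyGet? a i = some x) (hne : i ≠ (a.length : Int)) :
    arrayPartsLoop a i [] = PySem.Int.toStr x :: arrayPartsLoop a (i + 1) [] := by
  rw [arrayPartsLoop]
  simp only [if_neg hne]
  split
  · next h => rw [hg] at h; exact absurd h (by simp)
  · next y h =>
    rw [hg] at h
    cases h
    rw [arrayPartsLoop_acc]
    simp

lemma key_aux (a : List Int) : ∀ (n : Nat) (index : Int),
    (((a.length : Int) + 1 - index).toNat ≤ n) →
    -(a.length : Int) ≤ index → index ≤ (a.length : Int) →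
    array_to_sting a index = PySem.Str.join "," (arrayPartsLoop a index []) := by
  intro n
  induction n with
  | zero => intro index h h1 h2; omega
  | succ n ih =>
    intro index h h1 h2
    by_cases hlen : index = (a.length : Int)
    · rw [array_to_sting, arrayPartsLoop, if_pos hlen, if_pos hlen, pyJoin_nil]
    · have hlt : index < (a.length : Int) := lt_of_le_of_ne h2 hlen
      have hsome : ∃ x, PySem.List.pyGet? a index = some x := by
        rcases hg : PySem.List.pyGet? a index with _ | x
        · rw [PySem.List.pyGet?_eq_none_iff] at hg
          exact absurd (by unfold PySem.Raise.InRange; omega) hg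
        · exact ⟨x, rfl⟩
      rcases hsome with ⟨x, hg⟩
      rw [arrayPartsLoop_cons hg hlen, array_to_sting, if_neg hlen]
      split
      · next h' => rw [hg] at h'; exact absurd h' (by simp)
      · next y h' =>
        rw [hg] at h'
        cases h'
        by_cases hlast : index = (a.length : Int) - 1
        · have : index + 1 = (a.length : Int) := by omega
          rw [if_pos hlast, arrayPartsLoop, if_pos this, pyJoin_singleton]
        · have hlt2 : index + 1 < (a.length : Int) := by omega
          have hne2 : index + 1 ≠ (a.length : Int) := by omega
          have hsome2 : ∃ z, PySem.List.pyGet? a (index + 1) = some z := by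
            rcases hg2 : PySem.List.pyGet? a (index + 1) with _ | z
            · rw [PySem.List.pyGet?_eq_none_iff] at hg2
              exact absurd (by unfold PySem.Raise.InRange; omega) hg2
            · exact ⟨z, rfl⟩
          rcases hsome2 with ⟨z, hg2⟩
          rw [if_neg hlast, ih (index + 1) (by omega) (by omega) (by omega),
              arrayPartsLoop_cons hg2 hne2, pyJoin_cons_cons,
              ← arrayPartsLoop_cons hg2 hne2]

lemma key (a : List Int) (index : Int)
    (h1 : -(a.length : Int) ≤ index) (h2 : index ≤ (a.length : Int)) :
    array_to_sting a index = PySem.Str.join "," (arrayPartsLoop a index []) :=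
  key_aux a (((a.length : Int) + 1 - index).toNat) index le_rfl h1 h2

-- ===== VERDICT (by name: the statement is the Claim_ definition above) =====
theorem array_to_sting_spec : Claim_equal_array_to_sting := by
  intro a index _ hpre
  show _ = PySem.Str.join "," (arrayPartsLoop a index [])
  exact key a index hpre.1 hpre.2
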